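-- pv_equiv track=rewrite | github.com/Sekantti/AOC-2025 | day 2/part1.py | isNumRepeating
-- ===== SOURCE A (Python) =====
-- def get_digit(number, n):
--     return number // 10**n % 10
--
-- def isNumRepeating(int):
--     length = len(str(int))
--     if length % 2 == 0:
--         for x in range(length//2):
--             if get_digit(int, x) != get_digit(int, x+length//2):
--                 return False
--         return True
--
--     return False
-- ===== SOURCE B (Python) =====
-- def isNumRepeating(int):
--     length = len(str(int))
--     if length % 2 != 0:
--         return False
--     h = length // 2
--     return int % 10**h == int // 10**h % 10**h
-- ===== Notes on version B (the rewrite author's own statement) =====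
-- stated objective: simpler
-- what changed: B keeps A's even-length-of-str guard but replaces A's per-digit loop (with the get_digit helper) by a single closed-form modular comparison of the two halves: remainder and floor-quotient-then-remainder by the half-length power of ten.
import Mathlib
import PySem

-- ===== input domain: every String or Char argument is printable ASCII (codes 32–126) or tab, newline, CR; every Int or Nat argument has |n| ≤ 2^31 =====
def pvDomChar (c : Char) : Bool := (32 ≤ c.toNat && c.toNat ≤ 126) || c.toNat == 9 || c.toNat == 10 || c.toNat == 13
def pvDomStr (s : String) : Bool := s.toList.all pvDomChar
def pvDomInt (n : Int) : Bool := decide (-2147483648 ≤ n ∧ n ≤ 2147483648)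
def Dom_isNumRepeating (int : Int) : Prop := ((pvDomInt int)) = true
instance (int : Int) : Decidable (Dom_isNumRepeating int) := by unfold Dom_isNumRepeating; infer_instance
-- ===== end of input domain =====

-- B replaces A's per-digit loop by one closed-form modular comparison of the two halves
-- (int % 10**h == int // 10**h % 10**h); objective: simpler.

-- ===== PORT A =====
-- 10**n is ported as 10 ^ n.toNat: exact for 0 ≤ n, and every call site passes n ≥ 0
def getDigit (number : Int) (n : Int) : Int :=
  PySem.Int.mod (PySem.Int.floordiv number ((10:Int) ^ n.toNat)) 10

-- the 'for x in range(length//2)' loop with its early 'return False'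
def isRepLoop (int : Int) (half : Int) : List Int → Bool
  | [] => true
  | x :: xs =>
    if getDigit int x ≠ getDigit int (x + half) then false
    else isRepLoop int half xs

def isNumRepeating (int : Int) : Bool :=
  let length : Int := PySem.Str.len (PySem.Int.toStr int)
  if PySem.Int.mod length 2 == 0 then
    isRepLoop int (PySem.Int.floordiv length 2)
      (PySem.List.pyRange 0 (PySem.Int.floordiv length 2) 1)
  else false

-- ===== PORT B =====
-- 10**h is ported as 10 ^ h.toNat: exact since h = length // 2 ≥ 0
def isNumRepeating_alt (int : Int) : Bool :=
  let length : Int := PySem.Str.len (PySem.Int.toStr int)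
  if PySem.Int.mod length 2 != 0 then false
  else
    let h : Int := PySem.Int.floordiv length 2
    PySem.Int.mod int ((10:Int) ^ h.toNat) ==
      PySem.Int.mod (PySem.Int.floordiv int ((10:Int) ^ h.toNat)) ((10:Int) ^ h.toNat)

-- ===== PRECONDITION & SPEC =====
def Spec_isNumRepeating (int : Int) (out : Bool) : Prop := out = isNumRepeating_alt int
instance (int : Int) (out : Bool) : Decidable (Spec_isNumRepeating int out) := by unfold Spec_isNumRepeating; infer_instance

-- ===== CLAIM (what is proved, stated in full; the proofs are below) =====
def Claim_equal_isNumRepeating : Prop := ∀ (int : Int), Dom_isNumRepeating int → Spec_isNumRepeating int (isNumRepeating int)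

-- ===== LEMMAS AND PROOFS =====

theorem pv_divdiv (a : Int) (j : Nat) : a / 10 / 10^j = a / 10^(j+1) := by
  rw [Int.ediv_ediv_of_nonneg (x := a) (hy := by norm_num)]; ring_nf

-- peel the low digit off a % 10^(k+1)
theorem pv_emod_pow_succ (a : Int) (k : Nat) :
    a % 10^(k+1) = a % 10 + 10 * (a / 10 % 10^k) := by
  set M : Int := 10^(k+1) with hM
  set r : Int := a % 10 + 10 * (a / 10 % 10^k) with hr
  have hMk : M = 10 * 10^k := by rw [hM]; ring
  have e1 : 0 ≤ a % 10 := Int.emod_nonneg a (by norm_num)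
  have e2 : a % 10 < 10 := Int.emod_lt_of_pos a (by norm_num)
  have pk : (0:Int) < 10^k := by positivity
  have e3 : 0 ≤ a / 10 % 10^k := Int.emod_nonneg _ (by omega)
  have e4 : a / 10 % 10^k < 10^k := Int.emod_lt_of_pos _ pk
  have hr0 : 0 ≤ r := by omega
  have hrM : r < M := by rw [hMk]; omega
  have hsub : (a - r) % M = 0 := by
    have d1 : 10 * (a/10) + a % 10 = a := by omega
    have d2 : 10^k * (a/10/10^k) + (a/10) % 10^k = a/10 := by
      have := Int.mul_ediv_add_emod (a/10) (10^k); omega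
    have heq : a - r = M * (a/10/10^k) := by rw [hMk]; nlinarith [d1, d2]
    rw [heq]; exact Int.mul_emod_right _ _
  have h5 : a % M = r % M := Int.emod_eq_emod_iff_emod_sub_eq_zero.mpr hsub
  rw [h5, Int.emod_eq_of_lt hr0 hrM]

-- two integers agree mod 10^k iff their k low digits agree
theorem pv_digits_iff (k : Nat) (a b : Int) :
    a % 10^k = b % 10^k ↔ ∀ j < k, a / 10^j % 10 = b / 10^j % 10 := by
  induction k generalizing a b with
  | zero => simp
  | succ k ih =>
    rw [pv_emod_pow_succ a k, pv_emod_pow_succ b k]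
    have e1 : 0 ≤ a % 10 := Int.emod_nonneg a (by norm_num)
    have e2 : a % 10 < 10 := Int.emod_lt_of_pos a (by norm_num)
    have e1' : 0 ≤ b % 10 := Int.emod_nonneg b (by norm_num)
    have e2' : b % 10 < 10 := Int.emod_lt_of_pos b (by norm_num)
    constructor
    · intro h j hj
      have hmod : a % 10 = b % 10 ∧ a/10 % 10^k = b/10 % 10^k := by omega
      cases j with
      | zero => simpa using hmod.1
      | succ j =>
        have := (ih (a/10) (b/10)).mp hmod.2 j (by omega)
        rwa [pv_divdiv, pv_divdiv] at this
    · intro h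
      have h0 : a % 10 = b % 10 := by simpa using h 0 (by omega)
      have h1 : a/10 % 10^k = b/10 % 10^k := by
        apply (ih (a/10) (b/10)).mpr
        intro j hj
        rw [pv_divdiv, pv_divdiv]
        exact h (j+1) (by omega)
      omega

-- the early-return loop is List.all
theorem pv_isRepLoop_all (int half : Int) (l : List Int) :
    isRepLoop int half l = l.all (fun x => getDigit int x == getDigit int (x + half)) := by
  induction l with
  | nil => rfl
  | cons x xs ih =>
    simp only [isRepLoop, List.all_cons, ih]
    by_cases h : getDigit int x = getDigit int (x + half) <;> simp [h]

-- A's digit loop over range(k) equals B's single modular comparison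
theorem pv_loop_eq_mod (int : Int) (k : Nat) :
    isRepLoop int (k : Int) (PySem.List.pyRange 0 (k : Int) 1) =
      (PySem.Int.mod int ((10:Int)^k) ==
        PySem.Int.mod (PySem.Int.floordiv int ((10:Int)^k)) ((10:Int)^k)) := by
  have pk : (0:Int) < 10^k := by positivity
  rw [pv_isRepLoop_all]
  rw [PySem.Int.floordiv_eq_ediv_of_pos pk, PySem.Int.mod_eq_emod_of_pos pk,
      PySem.Int.mod_eq_emod_of_pos pk]
  rcases Bool.eq_false_or_eq_true
      (int % 10^k == (int / 10^k) % 10^k : Bool) with hb | hb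
  all_goals rw [hb]
  case inr => -- modular comparison false → some digit differs → all = false
    rw [beq_eq_false_iff_ne] at hb
    rw [List.all_eq_false]
    have := (not_iff_not.mpr (pv_digits_iff k int (int / 10^k))).mp hb
    push Not at this
    obtain ⟨j, hj, hne⟩ := this
    refine ⟨(j : Int), ?_, ?_⟩
    · rw [PySem.List.mem_pyRange_one]; omega
    · simp only [getDigit, Bool.not_eq_true, beq_eq_false_iff_ne, ne_eq]
      have h1 : ((j:Int).toNat) = j := by omega
      have h2 : (((j:Int) + (k:Int)).toNat) = j + k := by omega
      rw [h1, h2]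
      have pj : (0:Int) < 10^j := by positivity
      rw [PySem.Int.mod_eq_emod_of_pos (by norm_num : (0:Int) < 10),
          PySem.Int.mod_eq_emod_of_pos (by norm_num : (0:Int) < 10),
          PySem.Int.floordiv_eq_ediv_of_pos pj,
          PySem.Int.floordiv_eq_ediv_of_pos (by positivity : (0:Int) < 10^(j+k))]
      intro hc
      apply hne
      have hsplit : int / 10^(j+k) = int / 10^k / 10^j := by
        rw [Int.ediv_ediv_of_nonneg (x := int) (hy := by positivity)]
        rw [← pow_add]; ring_nf
      rw [hsplit] at hc
      exact hc
  case inl => -- modular comparison true → all digits equal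
    rw [beq_iff_eq] at hb
    have hall := (pv_digits_iff k int (int / 10^k)).mp hb
    rw [List.all_eq_true]
    intro x hx
    rw [PySem.List.mem_pyRange_one] at hx
    obtain ⟨j, rfl⟩ : ∃ j : Nat, x = (j : Int) := ⟨x.toNat, by omega⟩
    have hj : j < k := by omega
    simp only [getDigit, beq_iff_eq]
    have h1 : ((j:Int).toNat) = j := by omega
    have h2 : (((j:Int) + (k:Int)).toNat) = j + k := by omega
    rw [h1, h2]
    have pj : (0:Int) < 10^j := by positivity
    rw [PySem.Int.mod_eq_emod_of_pos (by norm_num : (0:Int) < 10),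
        PySem.Int.mod_eq_emod_of_pos (by norm_num : (0:Int) < 10),
        PySem.Int.floordiv_eq_ediv_of_pos pj,
        PySem.Int.floordiv_eq_ediv_of_pos (by positivity : (0:Int) < 10^(j+k))]
    have hsplit : int / 10^(j+k) = int / 10^k / 10^j := by
      rw [Int.ediv_ediv_of_nonneg (x := int) (hy := by positivity)]
      rw [← pow_add]; ring_nf
    rw [hsplit]
    exact hall j hj

-- ===== VERDICT (by name: the statement is the Claim_ definition above) =====
theorem isNumRepeating_spec : Claim_equal_isNumRepeating := by
  intro int _
  unfold Spec_isNumRepeating isNumRepeating isNumRepeating_alt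
  set length : Int := PySem.Str.len (PySem.Int.toStr int) with hlen
  have hlen0 : 0 ≤ length := by
    rw [hlen, PySem.Str.len_eq]; positivity
  have hh0 : 0 ≤ PySem.Int.floordiv length 2 := by
    rw [PySem.Int.floordiv_eq_ediv_of_pos (by norm_num : (0:Int) < 2)]
    omega
  by_cases hb : PySem.Int.mod length 2 = 0
  · rw [if_pos (beq_iff_eq.mpr hb), if_neg (by simp only [bne, hb]; decide)]
    obtain ⟨k, hk⟩ : ∃ k : Nat, PySem.Int.floordiv length 2 = (k : Int) :=
      ⟨(PySem.Int.floordiv length 2).toNat, by omega⟩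
    rw [hk]
    simp only [Int.toNat_natCast]
    exact pv_loop_eq_mod int k
  · rw [if_neg (by simp only [beq_iff_eq]; exact hb),
        if_pos (by simp only [bne, Bool.not_eq_true', beq_eq_false_iff_ne, ne_eq]; exact hb)]
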